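-- pv_equiv track=rewrite | github.com/null-order/localbooru | src/localbooru/tags.py | _consume_trailing_wrappers
-- ===== SOURCE A (Python) =====
-- def _consume_trailing_wrappers(token: str) -> str:
--     end = len(token)
--     while end > 0:
--         ch = token[end - 1]
--         if ch in "}]":
--             end -= 1
--             continue
--         if ch.isspace():
--             end -= 1
--             continue
--         break
--     return token[:end].rstrip()
-- ===== SOURCE B (Python) =====
-- def _consume_trailing_wrappers(token: str) -> str:
--     s = token.rstrip()
--     while s and s[-1] in "}]":
--         s = s[:-1].rstrip()
--     return s
-- ===== Notes on version B (the rewrite author's own statement) =====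
-- stated objective: simpler
-- what changed: Replaces the backward index scan with hand-written whitespace detection (plus a redundant final rstrip) by a shrinking string: rstrip once, then repeatedly drop a trailing bracket and rstrip again.
import Mathlib
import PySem

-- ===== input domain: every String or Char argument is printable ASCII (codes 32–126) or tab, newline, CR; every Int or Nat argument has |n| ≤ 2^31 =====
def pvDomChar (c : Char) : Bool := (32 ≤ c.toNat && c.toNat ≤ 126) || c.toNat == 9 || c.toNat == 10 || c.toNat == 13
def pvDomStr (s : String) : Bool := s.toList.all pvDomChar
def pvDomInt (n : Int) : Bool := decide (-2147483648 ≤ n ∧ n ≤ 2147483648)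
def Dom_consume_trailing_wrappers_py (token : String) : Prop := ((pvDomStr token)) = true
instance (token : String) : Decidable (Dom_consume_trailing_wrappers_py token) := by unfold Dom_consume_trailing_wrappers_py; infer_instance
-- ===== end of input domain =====

-- B replaces A's backward index scan (with hand-written whitespace test and final rstrip)
-- by a shrinking string: rstrip once, then repeatedly drop a trailing bracket and rstrip again.

-- ===== PORT A =====
-- the `while end > 0: …` loop of A, structural recursion on `end`;
-- `token[end - 1]` is in range whenever end ≤ len(token), so `getD` with any default is exact
def pvALoop (cs : List Char) : Nat → Nat
  | 0 => 0
  | Nat.succ e =>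
      let ch := cs.getD e ' '
      if ch == '}' || ch == ']' then pvALoop cs e
      else if PySem.Chars.isspace ch then pvALoop cs e
      else Nat.succ e

def consume_trailing_wrappers_py (token : String) : String :=
  let cs := token.toList
  let e := pvALoop cs cs.length
  -- token[:end].rstrip(): end = e is a Nat with 0 ≤ e ≤ len, so token[:end] = take e (exact)
  String.ofList (PySem.Chars.rstrip (cs.take e))

-- ===== PORT B =====
-- the `while s and s[-1] in "}]": s = s[:-1].rstrip()` loop; s[-1] on a nonempty
-- string is its last char (getLast?), s[:-1] drops the last char (dropLast) — exact
def pvBLoop (cs : List Char) : List Char :=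
  match h : cs.getLast? with
  | some c =>
      if c == '}' || c == ']' then pvBLoop (PySem.Chars.rstrip cs.dropLast)
      else cs
  | none => cs
termination_by cs.length
decreasing_by
  have hne : cs ≠ [] := by intro hnil; simp [hnil] at h
  have h1 : (PySem.Chars.rstrip cs.dropLast).length ≤ cs.dropLast.length := by
    simp [PySem.Chars.rstrip]
    exact le_trans (List.length_dropWhile_le _ _) (by simp)
  have h2 : cs.dropLast.length < cs.length := by
    cases cs with
    | nil => exact absurd rfl hne
    | cons a t => simp
  omega

def consume_trailing_wrappers_py_alt (token : String) : String :=
  String.ofList (pvBLoop (PySem.Chars.rstrip token.toList))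

-- ===== PRECONDITION & SPEC =====
def Spec_consume_trailing_wrappers_py (token : String) (out : String) : Prop := out = consume_trailing_wrappers_py_alt token
instance (token : String) (out : String) : Decidable (Spec_consume_trailing_wrappers_py token out) := by unfold Spec_consume_trailing_wrappers_py; infer_instance

-- ===== CLAIM (what is proved, stated in full; the proofs are below) =====
def Claim_equal_consume_trailing_wrappers_py : Prop := ∀ (token : String), Dom_consume_trailing_wrappers_py token → Spec_consume_trailing_wrappers_py token (consume_trailing_wrappers_py token)

-- ===== LEMMAS AND PROOFS =====

-- the combined predicate both programs strip from the right
def pvWrap (c : Char) : Bool := c == '}' || c == ']' || PySem.Chars.isspace c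

theorem pv_dropWhile_dropWhile {p q : Char → Bool} (hpq : ∀ c, q c = true → p c = true)
    (l : List Char) : (l.dropWhile q).dropWhile p = l.dropWhile p := by
  induction l with
  | nil => rfl
  | cons a t ih =>
      by_cases hq : q a = true
      · simp [hq, hpq a hq, ih]
      · simp [List.dropWhile_cons, hq]

theorem pv_head_dropWhile {p : Char → Bool} (l : List Char) :
    ∀ c t, l.dropWhile p = c :: t → p c = false := by
  induction l with
  | nil => intro c t h; simp at h
  | cons a u ih =>
      intro c t h
      by_cases ha : p a = true
      · rw [List.dropWhile_cons_of_pos ha] at h; exact ih c t h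
      · rw [List.dropWhile_cons_of_neg ha] at h
        cases h; simpa using ha

theorem pvALoop_succ_pos (cs : List Char) (e : Nat) (hw : pvWrap (cs.getD e ' ') = true) :
    pvALoop cs (e + 1) = pvALoop cs e := by
  simp only [pvWrap, Bool.or_eq_true] at hw
  simp only [pvALoop]
  by_cases hb : ((cs.getD e ' ') == '}' || (cs.getD e ' ') == ']') = true
  · rw [if_pos hb]
  · have hs : PySem.Chars.isspace (cs.getD e ' ') = true := by
      rcases hw with h | h
      · exact absurd h (by simpa using hb)
      · exact h
    rw [if_neg hb, if_pos hs]

theorem pvALoop_succ_neg (cs : List Char) (e : Nat) (hw : pvWrap (cs.getD e ' ') = false) :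
    pvALoop cs (e + 1) = e + 1 := by
  simp only [pvWrap, Bool.or_eq_false_iff, beq_eq_false_iff_ne] at hw
  simp only [pvALoop, List.getD] at hw ⊢
  split_ifs with h1 h2 <;> simp_all

-- A's loop characterised: take (pvALoop cs e) of cs is the reversal of
-- dropWhile pvWrap of the reversed prefix of length e
theorem pvALoop_take (cs : List Char) :
    ∀ e, e ≤ cs.length →
      cs.take (pvALoop cs e) = (((cs.take e).reverse.dropWhile pvWrap)).reverse := by
  intro e
  induction e with
  | zero => intro _; simp [pvALoop]
  | succ e ih =>
      intro he
      have hel : e < cs.length := by omega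
      have hget : cs[e]? = some cs[e] := by simp [hel]
      have hgetD : cs.getD e ' ' = cs[e] := by simp [List.getD, hget]
      have htake : (cs.take (e + 1)).reverse = cs[e] :: (cs.take e).reverse := by
        rw [List.take_add_one, hget]; simp
      by_cases hw : pvWrap cs[e] = true
      · rw [pvALoop_succ_pos cs e (by rw [hgetD]; exact hw)]
        rw [htake, List.dropWhile_cons_of_pos hw]
        exact ih (by omega)
      · rw [pvALoop_succ_neg cs e (by rw [hgetD]; simpa using hw)]
        rw [htake, List.dropWhile_cons_of_neg hw, ← htake, List.reverse_reverse]

-- a head surviving dropWhile pvWrap is not whitespace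
theorem pv_dropWhile_isspace_id (d : List Char)
    (h : ∀ c t, d = c :: t → pvWrap c = false) :
    d.dropWhile PySem.Chars.isspace = d := by
  cases d with
  | nil => rfl
  | cons c t =>
      have hc := h c t rfl
      simp only [pvWrap, Bool.or_eq_false_iff] at hc
      rw [List.dropWhile_cons_of_neg (by simp [hc.2])]

-- B's loop characterised, on lists whose reversal starts with a non-space char
theorem pvBLoop_spec (n : Nat) : ∀ r : List Char, r.length ≤ n →
    (∀ c t, r = c :: t → PySem.Chars.isspace c = false) →
    pvBLoop r.reverse = (r.dropWhile pvWrap).reverse := by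
  induction n with
  | zero =>
      intro r hr _
      have hz : r = [] := by cases r <;> simp_all
      subst hz
      rw [List.reverse_nil, pvBLoop]; simp
  | succ n ih =>
      intro r hr hhead
      cases r with
      | nil => rw [List.reverse_nil, pvBLoop]; simp
      | cons c t =>
          have hlast : (c :: t).reverse.getLast? = some c := by
            simp [List.getLast?_reverse]
          have hs : PySem.Chars.isspace c = false := hhead c t rfl
          rw [pvBLoop]
          split
          case _ c' heq =>
            rw [hlast] at heq
            injection heq with hcc
            subst hcc
            by_cases hb : (c == '}' || c == ']') = true
            · have hdl : (c :: t).reverse.dropLast = t.reverse := by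
                simp
              have hrs : PySem.Chars.rstrip t.reverse = (t.dropWhile PySem.Chars.isspace).reverse := by
                simp [PySem.Chars.rstrip]
              rw [if_pos hb, hdl, hrs]
              have hlen : (t.dropWhile PySem.Chars.isspace).length ≤ n := by
                have := List.length_dropWhile_le PySem.Chars.isspace t
                simp at hr; omega
              rw [ih _ hlen (fun c' t' h => pv_head_dropWhile t c' t' h)]
              rw [pv_dropWhile_dropWhile (fun x hx => by simp [pvWrap, hx]) t]
              rw [List.dropWhile_cons_of_pos (by simp [pvWrap, Bool.or_eq_true] at hb ⊢; tauto)]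
            · rw [if_neg hb]
              rw [List.dropWhile_cons_of_neg (by simp [pvWrap, Bool.or_eq_true, hs] at hb ⊢; tauto)]
          case _ heq =>
            rw [hlast] at heq
            cases heq

-- ===== VERDICT (by name: the statement is the Claim_ definition above) =====
theorem consume_trailing_wrappers_py_spec : Claim_equal_consume_trailing_wrappers_py := by
  intro token _
  unfold Spec_consume_trailing_wrappers_py
  simp only [consume_trailing_wrappers_py, consume_trailing_wrappers_py_alt]
  have hA : (token.toList).take (pvALoop token.toList token.toList.length)
      = (token.toList.reverse.dropWhile pvWrap).reverse := by
    have := pvALoop_take token.toList token.toList.length (le_refl _)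
    rwa [List.take_length] at this
  have hA2 : PySem.Chars.rstrip ((token.toList).take (pvALoop token.toList token.toList.length))
      = (token.toList.reverse.dropWhile pvWrap).reverse := by
    rw [hA]
    simp only [PySem.Chars.rstrip, List.reverse_reverse]
    rw [pv_dropWhile_isspace_id _ (fun c t h => pv_head_dropWhile token.toList.reverse c t h)]
  have hB : pvBLoop (PySem.Chars.rstrip token.toList)
      = (token.toList.reverse.dropWhile pvWrap).reverse := by
    have hrs : PySem.Chars.rstrip token.toList
        = (token.toList.reverse.dropWhile PySem.Chars.isspace).reverse := by
      simp [PySem.Chars.rstrip]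
    rw [hrs]
    rw [pvBLoop_spec (token.toList.reverse.dropWhile PySem.Chars.isspace).length _ (le_refl _)
      (fun c t h => pv_head_dropWhile token.toList.reverse c t h)]
    rw [pv_dropWhile_dropWhile (fun c hc => by simp [pvWrap, hc]) token.toList.reverse]
  rw [hA2, hB]
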